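-- pv_equiv track=rewrite | github.com/anupyadav27/threat-engine | pythonsdk-database/oci/tools/build_dependency_graph.py | resolve_entity_alias
-- ===== SOURCE A (Python) =====
-- from typing import Dict, List, Any, Set, Tuple, Optional
--
-- def resolve_entity_alias(entity: str, entity_aliases: Dict[str, str], visited: Optional[Set[str]] = None) -> str:
--     """Resolve entity alias to canonical (multi-hop safe)."""
--     if visited is None:
--         visited = set()
--
--     if entity in visited:
--         return entity  # Cycle detected
--
--     if entity in entity_aliases:
--         visited.add(entity)
--         return resolve_entity_alias(entity_aliases[entity], entity_aliases, visited)
--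
--     return entity
-- ===== SOURCE B (Python) =====
-- def resolve_entity_alias(entity, entity_aliases, visited=None):
--     """Resolve entity alias to canonical via a bounded iterative loop (no recursion)."""
--     if visited is None:
--         visited = set()
--     # each productive step marks a distinct alias key as visited, so at most
--     # len(entity_aliases) hops are possible before we must stop
--     for _ in range(len(entity_aliases) + 1):
--         if entity in visited:
--             return entity
--         if entity not in entity_aliases:
--             return entity
--         visited.add(entity)
--         entity = entity_aliases[entity]
--     return entity
-- ===== Notes on version B (the rewrite author's own statement) =====
-- stated objective: simpler
-- what changed: Replaces the recursion with a flat bounded for-loop that rebinds entity in place; the len(aliases)+1 iteration bound replaces the implicit call-depth argument, with the same visited-set bookkeeping.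
import Mathlib
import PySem

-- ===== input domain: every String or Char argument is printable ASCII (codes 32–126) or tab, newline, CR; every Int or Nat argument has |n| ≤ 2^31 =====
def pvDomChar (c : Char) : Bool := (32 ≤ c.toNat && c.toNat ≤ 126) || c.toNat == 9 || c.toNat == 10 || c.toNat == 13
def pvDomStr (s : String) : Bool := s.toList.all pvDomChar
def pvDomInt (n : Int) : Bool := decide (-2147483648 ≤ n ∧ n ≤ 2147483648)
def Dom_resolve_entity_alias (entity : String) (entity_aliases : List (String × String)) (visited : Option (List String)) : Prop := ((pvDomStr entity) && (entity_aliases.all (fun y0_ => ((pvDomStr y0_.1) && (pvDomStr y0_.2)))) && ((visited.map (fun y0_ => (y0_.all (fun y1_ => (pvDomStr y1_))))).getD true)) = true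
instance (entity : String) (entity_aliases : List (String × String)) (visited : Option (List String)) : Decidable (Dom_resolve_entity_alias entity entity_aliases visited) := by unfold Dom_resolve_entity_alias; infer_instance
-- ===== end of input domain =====

-- B replaces A's recursion with a flat bounded for-loop (objective: simpler).
-- Both A and B mutate a caller-supplied `visited` set identically in Python; the
-- equivalence proved here is about the RETURN value.

-- measure used only for A's termination: alias keys not yet visited
def pvUnvisited (entity_aliases : List (String × String)) (v : List String) : Nat :=
  ((entity_aliases.map Prod.fst).filter (fun k => !v.contains k)).length

theorem pvFilter_append_lt (L v : List String) (e : String) (he : e ∈ L)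
    (hv : v.contains e = false) :
    (L.filter (fun k => !(v ++ [e]).contains k)).length
      < (L.filter (fun k => !v.contains k)).length := by
  have hmono : ∀ (M : List String),
      (M.filter (fun k => !(v ++ [e]).contains k)).length
        ≤ (M.filter (fun k => !v.contains k)).length := by
    intro M
    apply List.Sublist.length_le
    apply List.monotone_filter_right
    intro x hx
    simp only [List.contains_append, Bool.not_or, Bool.and_eq_true] at hx
    exact hx.1
  induction L with
  | nil => cases he
  | cons a l ih =>
    simp only [List.filter_cons]
    by_cases hae : a = e
    · subst hae
      have h1 : (!(v ++ [a]).contains a) = false := by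
        simp
      have h2 : (!v.contains a) = true := by rw [hv]; rfl
      rw [h1, h2]
      exact Nat.lt_succ_of_le (hmono l)
    · have hmem : e ∈ l := by
        rcases List.mem_cons.mp he with h | h
        · exact absurd h.symm hae
        · exact h
      have hlt := ih hmem
      by_cases c1 : (!(v ++ [e]).contains a) = true
      · have c2 : (!v.contains a) = true := by
          simp only [List.contains_append, Bool.not_or, Bool.and_eq_true] at c1
          exact c1.1
        rw [c1, c2]; simpa using hlt
      · rw [Bool.not_eq_true] at c1
        rw [c1]
        by_cases c2 : (!v.contains a) = true
        · rw [c2]; exact Nat.lt_succ_of_lt hlt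
        · rw [Bool.not_eq_true] at c2; rw [c2]; exact hlt

theorem pvUnvisited_add_lt (entity_aliases : List (String × String)) (v : List String)
    (e w : String) (hv : v.contains e = false)
    (hk : (PySem.Dict.mk entity_aliases).get? e = some w) :
    pvUnvisited entity_aliases (PySem.Set.add v e) < pvUnvisited entity_aliases v := by
  have he : e ∈ entity_aliases.map Prod.fst := by
    have hm := PySem.Dict.mem_items_of_get?_eq_some _ hk
    exact List.mem_map.mpr ⟨(e, w), hm, rfl⟩
  have hadd : PySem.Set.add v e = v ++ [e] := by
    simp only [PySem.Set.add, PySem.Set.contains, hv, Bool.false_eq_true, if_false]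
  unfold pvUnvisited
  rw [hadd]
  exact pvFilter_append_lt _ v e he hv

-- ===== PORT A =====
def resolve_entity_alias (entity : String) (entity_aliases : List (String × String)) (visited : Option (List String)) : String :=
  let v := match visited with
    | none => ([] : List String)
    | some s => s
  if hv : v.contains entity = true then
    entity
  else
    match h : (PySem.Dict.mk entity_aliases).get? entity with
    | some nxt => resolve_entity_alias nxt entity_aliases (some (PySem.Set.add v entity))
    | none => entity
termination_by pvUnvisited entity_aliases (match visited with | none => [] | some s => s)
decreasing_by
  exact pvUnvisited_add_lt entity_aliases _ entity _ (by simpa using hv) h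

-- ===== PORT B =====
-- the for-loop of Source B: fuel counts the remaining range iterations; fuel 0 is the
-- fall-through `return entity` after the range is exhausted
def resolve_loop (fuel : Nat) (entity : String) (entity_aliases : List (String × String)) (v : List String) : String :=
  match fuel with
  | 0 => entity
  | n + 1 =>
    if v.contains entity then entity
    else match (PySem.Dict.mk entity_aliases).get? entity with
      | none => entity
      | some nxt => resolve_loop n nxt entity_aliases (PySem.Set.add v entity)

def resolve_entity_alias_alt (entity : String) (entity_aliases : List (String × String)) (visited : Option (List String)) : String :=
  resolve_loop (entity_aliases.length + 1) entity entity_aliases (visited.getD [])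

-- ===== PRECONDITION & SPEC =====
def Spec_resolve_entity_alias (entity : String) (entity_aliases : List (String × String)) (visited : Option (List String)) (out : String) : Prop := out = resolve_entity_alias_alt entity entity_aliases visited
instance (entity : String) (entity_aliases : List (String × String)) (visited : Option (List String)) (out : String) : Decidable (Spec_resolve_entity_alias entity entity_aliases visited out) := by unfold Spec_resolve_entity_alias; infer_instance

-- ===== CLAIM (what is proved, stated in full; the proofs are below) =====
def Claim_equal_resolve_entity_alias : Prop := ∀ (entity : String) (entity_aliases : List (String × String)) (visited : Option (List String)), Dom_resolve_entity_alias entity entity_aliases visited → Spec_resolve_entity_alias entity entity_aliases visited (resolve_entity_alias entity entity_aliases visited)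

-- ===== LEMMAS AND PROOFS =====

theorem resolve_loop_eq (fuel : Nat) :
    ∀ (entity : String) (entity_aliases : List (String × String)) (v : List String),
    pvUnvisited entity_aliases v < fuel →
    resolve_loop fuel entity entity_aliases v = resolve_entity_alias entity entity_aliases (some v) := by
  induction fuel with
  | zero => intro _ _ _ h; omega
  | succ n ih =>
    intro entity entity_aliases v hlt
    rw [resolve_entity_alias.eq_def]
    simp only [resolve_loop]
    by_cases hm : entity ∈ v
    · have hv : v.contains entity = true := by simpa using hm
      simp [PySem.Set.contains, hm]
    · have hv : v.contains entity = false := by simpa using hm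
      cases hg : (PySem.Dict.mk entity_aliases).get? entity with
      | none => simp [PySem.Set.contains, hm]
      | some nxt =>
        have hdec := pvUnvisited_add_lt entity_aliases v entity nxt hv hg
        simp only [PySem.Set.contains, hv, Bool.false_eq_true, if_false]
        exact ih nxt entity_aliases (PySem.Set.add v entity) (by omega)

theorem pvUnvisited_le (entity_aliases : List (String × String)) (v : List String) :
    pvUnvisited entity_aliases v ≤ entity_aliases.length := calc
  pvUnvisited entity_aliases v ≤ (entity_aliases.map Prod.fst).length :=
    List.length_filter_le _ _
  _ = entity_aliases.length := List.length_map ..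

-- ===== VERDICT (by name: the statement is the Claim_ definition above) =====
theorem resolve_entity_alias_spec : Claim_equal_resolve_entity_alias := by
  intro entity entity_aliases visited _
  unfold Spec_resolve_entity_alias resolve_entity_alias_alt
  have h := pvUnvisited_le entity_aliases (visited.getD [])
  rw [resolve_loop_eq _ entity entity_aliases (visited.getD []) (by omega)]
  cases visited with
  | some s => rfl
  | none =>
    rw [resolve_entity_alias.eq_def, resolve_entity_alias.eq_def]
    rfl
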